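-- pv_equiv track=rewrite | github.com/karanyadav14/HSL844_Major_project | Preprocessing_corpus1.py | get_indices_unmasked_spans
-- ===== SOURCE A (Python) =====
-- def get_indices_unmasked_spans(mask):
--     """ Given a mask array, return spans of unmasked list items."""
--     spans = []
--     start = 0
--     while start < len(mask):
--         if mask[start]:
--             start += 1
--             continue
--         end = start
--         for i in range(start+1, len(mask)):
--             if mask[i]:
--                 break
--             else:
--                 end = i
--         spans.append((start, end))
--         start = end + 1
--     return spans
-- ===== SOURCE B (Python) =====
-- def get_indices_unmasked_spans(mask):
--     """ Given a mask array, return spans of unmasked list items."""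
--     spans = []
--     start = None
--     for i, m in enumerate(mask):
--         if m:
--             if start is not None:
--                 spans.append((start, i - 1))
--                 start = None
--         else:
--             if start is None:
--                 start = i
--     if start is not None:
--         spans.append((start, len(mask) - 1))
--     return spans
-- ===== Notes on version B (the rewrite author's own statement) =====
-- stated objective: idiomatic
-- what changed: Replaces A's nested while/for (which visits every unmasked element twice: once in the inner span scan, once again as the outer index jumps) by a single flat pass over enumerate(mask) with an open-span start flag, flushing a still-open span after the loop.
import Mathlib
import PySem

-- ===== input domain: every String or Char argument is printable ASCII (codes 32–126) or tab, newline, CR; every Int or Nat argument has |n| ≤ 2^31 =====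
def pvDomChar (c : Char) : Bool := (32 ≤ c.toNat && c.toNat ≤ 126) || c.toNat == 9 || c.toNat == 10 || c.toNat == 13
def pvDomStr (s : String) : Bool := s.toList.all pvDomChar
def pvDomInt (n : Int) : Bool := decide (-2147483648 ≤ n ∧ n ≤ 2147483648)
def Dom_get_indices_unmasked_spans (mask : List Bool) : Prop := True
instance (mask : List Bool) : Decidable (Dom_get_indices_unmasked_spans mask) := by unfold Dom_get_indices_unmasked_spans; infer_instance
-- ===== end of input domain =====

-- B replaces A's nested while/for scan by a single flat pass with an open-span flag (idiomatic; same cost).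

-- ===== PORT A =====
-- inner 'for i in range(start+1, len(mask)): if mask[i]: break else: end = i'
-- (i is the loop index, e the current value of 'end')
def pvAInner (mask : List Bool) (i e : Nat) : Nat :=
  if h : i < mask.length then
    if mask[i] then e else pvAInner mask (i + 1) i
  else e
termination_by mask.length - i

theorem pvAInner_ge (mask : List Bool) (i e : Nat) (he : e ≤ i) : e ≤ pvAInner mask i e := by
  unfold pvAInner
  split
  · split
    · exact le_rfl
    · exact le_trans he (pvAInner_ge mask (i + 1) i (Nat.le_succ i))
  · exact le_rfl
termination_by mask.length - i

-- outer 'while start < len(mask)' loop, carrying 'spans'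
def pvALoop (mask : List Bool) (start : Nat) (spans : List (Int × Int)) : List (Int × Int) :=
  if h : start < mask.length then
    if mask[start] then pvALoop mask (start + 1) spans
    else
      let e := pvAInner mask (start + 1) start
      pvALoop mask (e + 1) (spans ++ [((start : Int), (e : Int))])
  else spans
termination_by mask.length - start
decreasing_by
  · omega
  · have h1 : start ≤ pvAInner mask (start + 1) start := pvAInner_ge mask (start + 1) start (Nat.le_succ start)
    omega

def get_indices_unmasked_spans (mask : List Bool) : List (Int × Int) :=
  pvALoop mask 0 []

-- ===== PORT B =====
-- 'for i, m in enumerate(mask)' with state (spans, start); i is the running index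
def pvBLoop (spans : List (Int × Int)) (start : Option Int) (i : Int) :
    List Bool → List (Int × Int) × Option Int
  | [] => (spans, start)
  | m :: t =>
    if m then
      match start with
      | some s => pvBLoop (spans ++ [(s, i - 1)]) none (i + 1) t
      | none => pvBLoop spans none (i + 1) t
    else
      match start with
      | none => pvBLoop spans (some i) (i + 1) t
      | some s => pvBLoop spans (some s) (i + 1) t

def get_indices_unmasked_spans_alt (mask : List Bool) : List (Int × Int) :=
  match pvBLoop [] none 0 mask with
  | (spans, some s) => spans ++ [(s, (mask.length : Int) - 1)]
  | (spans, none) => spans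

-- ===== PRECONDITION & SPEC =====
def Spec_get_indices_unmasked_spans (mask : List Bool) (out : List (Int × Int)) : Prop := out = get_indices_unmasked_spans_alt mask
instance (mask : List Bool) (out : List (Int × Int)) : Decidable (Spec_get_indices_unmasked_spans mask out) := by unfold Spec_get_indices_unmasked_spans; infer_instance

-- ===== CLAIM (what is proved, stated in full; the proofs are below) =====
def Claim_equal_get_indices_unmasked_spans : Prop := ∀ (mask : List Bool), Dom_get_indices_unmasked_spans mask → Spec_get_indices_unmasked_spans mask (get_indices_unmasked_spans mask)

-- ===== LEMMAS AND PROOFS =====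

-- the final 'if start is not None' flush of Source B, applied to the loop's result
def pvFlush (mask : List Bool) : List (Int × Int) × Option Int → List (Int × Int)
  | (spans, some s) => spans ++ [(s, (mask.length : Int) - 1)]
  | (spans, none) => spans

theorem pvB_open (mask : List Bool) (j : Nat) (hj : 1 ≤ j) (hjl : j ≤ mask.length)
    (spans : List (Int × Int)) (s : Int) :
    pvFlush mask (pvBLoop spans (some s) (j : Int) (mask.drop j)) =
      pvFlush mask (pvBLoop (spans ++ [(s, (pvAInner mask j (j - 1) : Int))]) none
        ((pvAInner mask j (j - 1) : Int) + 1) (mask.drop (pvAInner mask j (j - 1) + 1))) := by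
  by_cases h : j < mask.length
  · have hd : mask.drop j = mask[j] :: mask.drop (j + 1) := List.drop_eq_getElem_cons h
    by_cases hm : mask[j] = true
    · -- span closes at j: e = j-1
      have he : pvAInner mask j (j - 1) = j - 1 := by
        unfold pvAInner; simp [h, hm]
      rw [he, hd, hm]
      have h1 : ((j : Int) - 1 + 1) = (j : Int) := by ring
      have h2 : ((j - 1 : Nat) : Int) = (j : Int) - 1 := by omega
      have h3 : (j - 1) + 1 = j := by omega
      simp [pvBLoop, h2, h1, h3, hd, hm]
    · -- still unmasked: recurse
      have hm' : mask[j] = false := by simpa using hm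
      have he : pvAInner mask j (j - 1) = pvAInner mask (j + 1) j := by
        conv_lhs => rw [pvAInner]
        simp [h, hm']
      rw [he, hd, hm']
      simp only [pvBLoop]
      have h4 : (j : Int) + 1 = ((j + 1 : Nat) : Int) := by omega
      rw [h4]
      have := pvB_open mask (j + 1) (by omega) (by omega) spans s
      simpa using this
  · -- j = mask.length: loop ends with the span open; flush closes it at len-1
    have hj' : j = mask.length := by omega
    have he : pvAInner mask j (j - 1) = j - 1 := by
      unfold pvAInner; simp [hj']
    have hd1 : mask.drop j = [] := by simp [hj']
    have hd2 : mask.drop (j - 1 + 1) = [] := by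
      have hj1 : j - 1 + 1 = j := by omega
      rw [hj1, hj']
      simp
    rw [he, hd1, hd2]
    simp only [pvBLoop, pvFlush]
    have : ((j - 1 : Nat) : Int) = (mask.length : Int) - 1 := by omega
    rw [this]
termination_by mask.length - j

theorem pvAB (mask : List Bool) (n : Nat) (spans : List (Int × Int)) :
    pvALoop mask n spans = pvFlush mask (pvBLoop spans none (n : Int) (mask.drop n)) := by
  by_cases h : n < mask.length
  · have hd : mask.drop n = mask[n] :: mask.drop (n + 1) := List.drop_eq_getElem_cons h
    by_cases hm : mask[n] = true
    · rw [pvALoop, hd, hm]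
      have h4 : (n : Int) + 1 = ((n + 1 : Nat) : Int) := by omega
      simp only [dif_pos h, pvBLoop]
      rw [h4]
      split_ifs with hcond
      · exact pvAB mask (n + 1) spans
      · exact absurd hm hcond
    · have hm' : mask[n] = false := by simpa using hm
      rw [pvALoop, hd, hm']
      have h4 : (n : Int) + 1 = ((n + 1 : Nat) : Int) := by omega
      simp only [dif_pos h, pvBLoop, Bool.false_eq_true, if_false]
      rw [h4]
      have hopen := pvB_open mask (n + 1) (by omega) (by omega) spans (n : Int)
      have he : pvAInner mask (n + 1) ((n + 1) - 1) = pvAInner mask (n + 1) n := by norm_num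
      rw [he] at hopen
      rw [hopen]
      have hge : n ≤ pvAInner mask (n + 1) n := pvAInner_ge mask (n + 1) n (Nat.le_succ n)
      have h5 : (pvAInner mask (n + 1) n : Int) + 1 = ((pvAInner mask (n + 1) n + 1 : Nat) : Int) := by omega
      rw [h5]
      split_ifs with hcond
      · exact absurd hcond (by simp [hm'])
      · exact pvAB mask (pvAInner mask (n + 1) n + 1) (spans ++ [((n : Int), (pvAInner mask (n + 1) n : Int))])
  · rw [pvALoop]
    have hd : mask.drop n = [] := by simp [(by omega : mask.length ≤ n)]
    rw [hd]
    simp [h, pvBLoop, pvFlush]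
termination_by mask.length - n
decreasing_by
  · omega
  · have := pvAInner_ge mask (n + 1) n (Nat.le_succ n)
    omega

-- ===== VERDICT (by name: the statement is the Claim_ definition above) =====
theorem get_indices_unmasked_spans_spec : Claim_equal_get_indices_unmasked_spans := by
  intro mask _
  show get_indices_unmasked_spans mask = get_indices_unmasked_spans_alt mask
  have h := pvAB mask 0 []
  simp only [List.drop_zero, Nat.cast_zero] at h
  unfold get_indices_unmasked_spans get_indices_unmasked_spans_alt
  rw [h]
  unfold pvFlush
  rcases pvBLoop [] none 0 mask with ⟨sp, st⟩
  cases st <;> rfl
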